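-- pv_equiv track=rewrite | github.com/tmcnulty387/OnDemand-Bot | order.py | find_matching_element
-- ===== SOURCE A (Python) =====
-- def find_matching_element(options: set, abbrev: str) -> str:
--     abbrev = abbrev.lower()
--     best_match = None
--
--     for option in options:
--         if option.lower().startswith(abbrev):
--             if best_match is None or len(option) < len(best_match):
--                 best_match = option
--
--     if best_match and all(not other.lower().startswith(abbrev) or other == best_match for other in options):
--         return best_match
--
--     return None
-- ===== SOURCE B (Python) =====
-- def find_matching_element(options: set, abbrev: str) -> str:
--     a = abbrev.lower()
--     matches = {o for o in options if o.lower().startswith(a)}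
--     if len(matches) == 1:
--         (m,) = matches
--         if m:
--             return m
--     return None
-- ===== Notes on version B (the rewrite author's own statement) =====
-- stated objective: simpler
-- what changed: Replaces A's shortest-match fold plus a second all() uniqueness re-scan by one set comprehension of the matches: return the match iff the match set is a singleton holding a nonempty string.
import Mathlib
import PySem

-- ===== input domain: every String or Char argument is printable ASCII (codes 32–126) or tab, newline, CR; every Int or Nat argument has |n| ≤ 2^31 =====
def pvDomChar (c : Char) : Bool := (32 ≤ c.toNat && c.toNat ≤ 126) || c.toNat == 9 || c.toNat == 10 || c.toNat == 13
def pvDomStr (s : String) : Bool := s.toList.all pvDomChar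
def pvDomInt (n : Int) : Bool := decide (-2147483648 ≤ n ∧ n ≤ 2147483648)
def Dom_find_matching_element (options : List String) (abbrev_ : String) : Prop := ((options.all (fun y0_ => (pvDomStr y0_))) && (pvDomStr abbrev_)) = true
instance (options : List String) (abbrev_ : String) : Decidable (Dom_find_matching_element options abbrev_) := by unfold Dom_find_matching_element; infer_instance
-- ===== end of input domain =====

-- B replaces A's shortest-match fold + second all() re-scan by one set comprehension of the
-- matches, returned iff it is a singleton holding a nonempty string (objective: simpler).

-- ===== PORT A =====
def find_matching_element (options : List String) (abbrev_ : String) : Option String :=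
  let ab := PySem.Str.lower abbrev_
  let best_match := options.foldl (fun best_match option =>
    if PySem.Str.startswith (PySem.Str.lower option) ab then
      match best_match with
      | none => some option
      | some b => if PySem.Str.len option < PySem.Str.len b then some option else some b
    else best_match) none
  match best_match with
  | none => none
  | some b =>
    if (b != "") && options.all (fun other =>
        !(PySem.Str.startswith (PySem.Str.lower other) ab) || other == b) then
      some b
    else none

-- ===== PORT B =====
def find_matching_element_alt (options : List String) (abbrev_ : String) : Option String :=
  let a := PySem.Str.lower abbrev_
  let ms : PySem.Set String :=
    PySem.Set.ofList (options.filter (fun o => PySem.Str.startswith (PySem.Str.lower o) a))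
  match ms with
  | [m] => if m != "" then some m else none
  | _ => none

-- ===== PRECONDITION & SPEC =====
def Spec_find_matching_element (options : List String) (abbrev_ : String) (out : Option String) : Prop := out = find_matching_element_alt options abbrev_
instance (options : List String) (abbrev_ : String) (out : Option String) : Decidable (Spec_find_matching_element options abbrev_ out) := by unfold Spec_find_matching_element; infer_instance

-- ===== CLAIM (what is proved, stated in full; the proofs are below) =====
def Claim_equal_find_matching_element : Prop := ∀ (options : List String) (abbrev_ : String), Dom_find_matching_element options abbrev_ → Spec_find_matching_element options abbrev_ (find_matching_element options abbrev_)

-- ===== LEMMAS AND PROOFS =====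

-- the fold body of A after the filter is pulled out
def pvStep (best : Option String) (option : String) : Option String :=
  match best with
  | none => some option
  | some b => if PySem.Str.len option < PySem.Str.len b then some option else some b

theorem pvStep_some (b option : String) : ∃ c, pvStep (some b) option = some c := by
  by_cases hl : PySem.Str.len option < PySem.Str.len b
  · refine ⟨option, ?_⟩
    show (if PySem.Str.len option < PySem.Str.len b then some option else some b) = some option
    rw [if_pos hl]
  · refine ⟨b, ?_⟩
    show (if PySem.Str.len option < PySem.Str.len b then some option else some b) = some b
    rw [if_neg hl]

theorem pv_fold_some : ∀ (ms : List String) (b : String),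
    ∃ c, ms.foldl pvStep (some b) = some c := by
  intro ms
  induction ms with
  | nil => intro b; exact ⟨b, rfl⟩
  | cons x t ih =>
    intro b
    obtain ⟨c, hc⟩ := pvStep_some b x
    simpa [List.foldl, hc] using ih c

theorem pv_fold_mem : ∀ (ms : List String) (acc : Option String) (b : String),
    ms.foldl pvStep acc = some b → b ∈ ms ∨ acc = some b := by
  intro ms
  induction ms with
  | nil => intro acc b h; exact Or.inr h
  | cons x t ih =>
    intro acc b h
    rcases ih (pvStep acc x) b h with hmem | hacc
    · exact Or.inl (List.mem_cons_of_mem _ hmem)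
    · cases acc with
      | none =>
        have hred : pvStep none x = some x := rfl
        rw [hred] at hacc; cases hacc; exact Or.inl List.mem_cons_self
      | some a =>
        have hred : pvStep (some a) x
            = if PySem.Str.len x < PySem.Str.len a then some x else some a := rfl
        rw [hred] at hacc
        split at hacc
        · injection hacc with h'; exact Or.inl (by simp [← h'])
        · injection hacc with h'; exact Or.inr (by simp [h'])

theorem pv_fold_const (m : String) : ∀ (ms : List String),
    (∀ x ∈ ms, x = m) → ms.foldl pvStep (some m) = some m := by
  intro ms
  induction ms with
  | nil => intro _; rfl
  | cons x t ih =>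
    intro h
    have hx : x = m := h x (List.mem_cons_self)
    have hstep : pvStep (some m) x = some m := by
      unfold pvStep; subst hx; simp
    simp only [List.foldl, hstep]
    exact ih (fun y hy => h y (List.mem_cons_of_mem _ hy))

theorem pv_ofList_singleton (ms : List String) (m : String)
    (hne : ms ≠ []) (hall : ∀ x ∈ ms, x = m) : PySem.Set.ofList ms = [m] := by
  have hnd := PySem.Set.nodup_ofList (α := String) (xs := ms)
  have hmem : ∀ x, x ∈ PySem.Set.ofList ms ↔ x ∈ ms := fun x => PySem.Set.mem_ofList _ _
  have hm : m ∈ PySem.Set.ofList ms := by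
    rw [hmem]
    cases ms with
    | nil => exact absurd rfl hne
    | cons y t => have := hall y (List.mem_cons_self); simp [← this]
  cases hl : PySem.Set.ofList ms with
  | nil => rw [hl] at hm; cases hm
  | cons a t =>
    have ha : a = m := hall a (by rw [← hmem]; rw [hl]; exact List.mem_cons_self)
    cases t with
    | nil => rw [ha]
    | cons c u =>
      have hc : c = m := hall c (by rw [← hmem]; rw [hl]; simp)
      rw [hl] at hnd
      exfalso
      have : a ≠ c := by
        have := List.nodup_cons.mp hnd
        intro he; exact this.1 (by simp [he])
      exact this (ha.trans hc.symm)

theorem pv_main (ms : List String) :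
    (match ms.foldl pvStep none with
     | none => none
     | some b => if (b != "") && ms.all (fun other => other == b) then some b else none)
    = (match PySem.Set.ofList ms with
       | [m] => if m != "" then some m else none
       | _ => none) := by
  cases ms with
  | nil => rfl
  | cons x t =>
    have hfold : (x :: t).foldl pvStep none = t.foldl pvStep (some x) := rfl
    obtain ⟨b, hb⟩ := pv_fold_some t x
    have hbmem : b ∈ x :: t := by
      rcases pv_fold_mem t (some x) b hb with h | h
      · exact List.mem_cons_of_mem _ h
      · cases h; exact List.mem_cons_self
    rw [hfold, hb]
    by_cases hall : ∀ y ∈ x :: t, y = b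
    · have hfold2 : t.foldl pvStep (some x) = some b := by
        have hx : x = b := hall x (List.mem_cons_self)
        subst hx
        exact pv_fold_const x t (fun y hy => hall y (List.mem_cons_of_mem _ hy))
      have hset : PySem.Set.ofList (x :: t) = [b] :=
        pv_ofList_singleton _ _ (by simp) hall
      rw [hset]
      have : (x :: t).all (fun other => other == b) = true := by
        simp only [List.all_eq_true, beq_iff_eq]; exact hall
      simp [this]
    · push Not at hall
      obtain ⟨y, hy, hyb⟩ := hall
      have hallf : (x :: t).all (fun other => other == b) = false := by
        rw [List.all_eq_false]
        exact ⟨y, hy, by simp [hyb]⟩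
      have hset : ∀ m, PySem.Set.ofList (x :: t) ≠ [m] := by
        intro m hm
        have hmemiff : ∀ z, z ∈ PySem.Set.ofList (x :: t) ↔ z ∈ x :: t :=
          fun z => PySem.Set.mem_ofList _ _
        have hbm : b = m := by
          have := (hmemiff b).mpr hbmem; rw [hm] at this; simpa using this
        have hym : y = m := by
          have := (hmemiff y).mpr hy; rw [hm] at this; simpa using this
        exact hyb (hym.trans hbm.symm)
      have hsetne : PySem.Set.ofList (x :: t) ≠ [] := by
        intro h
        have : x ∈ PySem.Set.ofList (x :: t) := (PySem.Set.mem_ofList _ _).mpr List.mem_cons_self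
        rw [h] at this; cases this
      simp only [hallf, Bool.and_false]
      cases hl : PySem.Set.ofList (x :: t) with
      | nil => exact absurd hl hsetne
      | cons a u =>
        cases u with
        | nil => exact absurd hl (hset a)
        | cons c v => simp

-- ===== VERDICT (by name: the statement is the Claim_ definition above) =====
theorem find_matching_element_spec : Claim_equal_find_matching_element := by
  intro options abbrev_ _
  unfold Spec_find_matching_element find_matching_element find_matching_element_alt
  dsimp only
  set p : String → Bool :=
    fun o => PySem.Str.startswith (PySem.Str.lower o) (PySem.Str.lower abbrev_) with hp
  have hfold :
      options.foldl (fun best_match option =>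
        if p option then
          match best_match with
          | none => some option
          | some b => if PySem.Str.len option < PySem.Str.len b then some option else some b
        else best_match) none
      = (options.filter p).foldl pvStep none := by
    exact PySem.List.foldl_if_eq_foldl_filter p pvStep options none
  have hall : ∀ b : String,
      options.all (fun other => !(p other) || other == b)
      = (options.filter p).all (fun other => other == b) := by
    intro b
    induction options with
    | nil => rfl
    | cons x t ih =>
      by_cases hx : p x = true
      · simp [List.filter, hx, List.all]
      · simp only [Bool.not_eq_true] at hx
        simp [List.filter, hx, List.all]
  rw [hfold]
  calc (match (options.filter p).foldl pvStep none with
        | none => none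
        | some b =>
          if (b != "") && options.all (fun other => !(p other) || other == b) then some b
          else none)
      = (match (options.filter p).foldl pvStep none with
        | none => none
        | some b =>
          if (b != "") && (options.filter p).all (fun other => other == b) then some b
          else none) := by
        cases (options.filter p).foldl pvStep none with
        | none => rfl
        | some b => simp only [hall b]
    _ = _ := pv_main (options.filter p)
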